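-- pv_equiv track=rewrite | github.com/Natkuma01/Python-Practice-Problems | problems/problem_058.py | group_cities_by_state
-- ===== SOURCE A (Python) =====
-- def group_cities_by_state(cities):
-- #     # create empty dictionary name result
--     result = {}
-- #     # iterate the each item in the cities list
--     for item in cities:
-- #     # take away the "," in each item, and set one value as name, and the other value as state
--         name, state = item.split(",")
-- #     # use strip method, set the state as a variable name state_initial
--         state_initial = state.strip()
-- #     # if state_initial is not in the result dictionary
--         if state_initial not in result:
-- #     #  state_initial will be the key in the dictionary, set empty as the value for now
--             result[state_initial] = []
-- #     # add the name as the value in the dictionary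
--         result[state_initial].append(name)
-- #     # return to result
--     return result
-- ===== SOURCE B (Python) =====
-- def group_cities_by_state(cities):
--     # one pass: extract (state_initial, name) pairs (same ValueError on malformed items)
--     pairs = []
--     for item in cities:
--         name, state = item.split(",")
--         pairs.append((state.strip(), name))
--     # distinct states in first-occurrence order
--     seen = []
--     for key, _ in pairs:
--         if key not in seen:
--             seen.append(key)
--     # one filtering comprehension per state
--     return {key: [n for k, n in pairs if k == key] for key in seen}
-- ===== Notes on version B (the rewrite author's own statement) =====
-- stated objective: alternative
-- what changed: B replaces A's single hashing pass (dict of growing lists) by a three-phase decomposition: extract (state, name) pairs once, dedup the states in first-occurrence order, then build each group by a per-state filtering comprehension over the pairs.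
import Mathlib
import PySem

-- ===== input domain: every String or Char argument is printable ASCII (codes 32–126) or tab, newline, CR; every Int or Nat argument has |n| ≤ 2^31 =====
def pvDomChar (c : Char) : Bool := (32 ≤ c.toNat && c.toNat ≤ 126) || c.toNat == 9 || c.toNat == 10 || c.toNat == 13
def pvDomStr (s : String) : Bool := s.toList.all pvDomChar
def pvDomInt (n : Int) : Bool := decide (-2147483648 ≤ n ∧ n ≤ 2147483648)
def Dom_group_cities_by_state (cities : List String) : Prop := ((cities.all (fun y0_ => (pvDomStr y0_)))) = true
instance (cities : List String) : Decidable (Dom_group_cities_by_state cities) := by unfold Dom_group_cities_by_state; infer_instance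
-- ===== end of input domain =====

-- B groups by a three-phase decomposition (extract pairs, dedup states, filter per state)
-- instead of A's single hashing pass; equivalence of the returned dict (same items, same order) is proved below.

-- ===== PORT A =====
-- shared extraction step: `name, state = item.split(",")` (ValueError unless exactly 2 parts,
-- modelled as none) followed by `state.strip()`; returns (state_initial, name)
def pairOf? (item : String) : Option (String × String) :=
  match PySem.Str.split? item "," with
  | some [name, state] => some (PySem.Str.strip state, name)
  | _ => none

def group_cities_by_state (cities : List String) : List (String × List String) :=
  (cities.foldl (fun result item =>
    match pairOf? item with
    | none => result           -- unreachable under Pre_ (Python raises ValueError)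
    | some (state_initial, name) =>
      let result := if result.contains state_initial then result
                    else result.insert state_initial ([] : List String)
      result.modify state_initial [] (fun l => l ++ [name])) PySem.Dict.empty).items

-- ===== PORT B =====
def group_cities_by_state_alt (cities : List String) : List (String × List String) :=
  let pairs := cities.filterMap pairOf?
  let seen := PySem.Set.ofList (pairs.map (fun p => p.1))
  seen.map (fun key => (key, List.map (fun p => p.2) (List.filter (fun p => p.1 == key) pairs)))

-- ===== PRECONDITION & SPEC =====
-- Pre_ excludes exactly the items that do not contain exactly one comma: there the Python A
-- (and the Python B alike) raises ValueError on tuple unpacking of item.split(",").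
def Pre_group_cities_by_state (cities : List String) : Prop :=
  ∀ item ∈ cities, ((PySem.Str.split? item ",").getD []).length = 2
instance (cities : List String) : Decidable (Pre_group_cities_by_state cities) := by unfold Pre_group_cities_by_state; infer_instance

def pvWitness_group_cities_by_state : List String :=
  ["Tokyo, JP", "Austin, TX", "Dallas,  TX", "Osaka, JP"]

def Spec_group_cities_by_state (cities : List String) (out : List (String × List String)) : Prop := out = group_cities_by_state_alt cities
instance (cities : List String) (out : List (String × List String)) : Decidable (Spec_group_cities_by_state cities out) := by unfold Spec_group_cities_by_state; infer_instance

-- ===== CLAIM (what is proved, stated in full; the proofs are below) =====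
def Claim_equal_group_cities_by_state : Prop := ∀ (cities : List String), Dom_group_cities_by_state cities → Pre_group_cities_by_state cities → Spec_group_cities_by_state cities (group_cities_by_state cities)

-- ===== LEMMAS AND PROOFS =====

-- A's per-item step: the conditional `result[k] = []` insertion followed by the append is one modify
theorem step_eq (d : PySem.Dict String (List String)) (k n : String) :
    ((if d.contains k then d else d.insert k ([]:List String)).modify k [] (fun l => l ++ [n]))
    = d.modify k [] (fun l => l ++ [n]) := by
  by_cases h : d.contains k = true
  · simp [h]
  · have hall : ∀ p ∈ d.items, ¬ (p.1 == k) = true := by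
      intro p hp hc
      exact h (List.any_eq_true.mpr ⟨p, hp, hc⟩)
    have hfalse : (d.items.any fun p => p.1 == k) = false := by
      rw [List.any_eq_false]; exact hall
    have hfind : d.items.find? (fun p => p.1 == k) = none := List.find?_eq_none.mpr hall
    have hmap : ∀ (v : List String), List.map (fun p => if p.1 = k then (k, v) else p) d.items = d.items := by
      intro v
      conv_rhs => rw [← List.map_id d.items]
      refine List.map_congr_left (fun p hp => ?_)
      have : ¬ p.1 = k := fun hh => hall p hp (beq_iff_eq.mpr hh)
      simp [this]
    apply PySem.Dict.ext
    simp [PySem.Dict.modify, PySem.Dict.insert, PySem.Dict.getD, PySem.Dict.get?,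
      PySem.Dict.contains, hfalse, hfind, hmap]

-- A's loop over cities is the grouping fold over the extracted pairs
theorem foldA_eq (cities : List String) (d : PySem.Dict String (List String)) :
    cities.foldl (fun result item =>
      match pairOf? item with
      | none => result
      | some (state_initial, name) =>
        let result := if result.contains state_initial then result
                      else result.insert state_initial ([] : List String)
        result.modify state_initial [] (fun l => l ++ [name])) d
    = (cities.filterMap pairOf?).foldl
        (fun d p => d.modify p.1 [] (fun l => l ++ [p.2])) d := by
  induction cities generalizing d with
  | nil => rfl
  | cons x xs ih =>
    cases h : pairOf? x with
    | none => simp [List.foldl_cons, h, ih]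
    | some p =>
      obtain ⟨k, n⟩ := p
      simp only [List.foldl_cons, List.filterMap_cons, h]
      rw [step_eq, ih]

-- ===== VERDICT (by name: the statement is the Claim_ definition above) =====

theorem group_cities_by_state_spec : Claim_equal_group_cities_by_state := by
  intro cities _ _
  unfold Spec_group_cities_by_state group_cities_by_state group_cities_by_state_alt
  rw [foldA_eq]
  set pairs := cities.filterMap pairOf? with hp
  have hnodup : ((pairs.foldl (fun d p => d.modify p.1 [] (fun l => l ++ [p.2])) PySem.Dict.empty)).keys.Nodup :=
    PySem.Dict.nodup_keys_foldl_modify_key pairs (fun p => p.1) [] (fun _ p => fun l => l ++ [p.2])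
      PySem.Dict.empty (by simp)
  rw [PySem.Dict.items_eq_map_keys _ hnodup []]
  rw [PySem.Dict.keys_foldl_modify_key pairs (fun p => p.1) [] (fun _ p => fun l => l ++ [p.2])]
  refine List.map_congr_left (fun k _ => ?_)
  rw [PySem.Dict.getD_foldl_modify_append]
  simp [PySem.Dict.getD_empty]
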